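-- pv_equiv track=rewrite | github.com/jikerbug/yousictube | TRAINING MODEL/prepare_dataset.py | chord_to_int
-- ===== SOURCE A (Python) =====
-- def chord_to_int(chord_name):
--     """
--     ' 목적 : 인공지능 학습을 위해 data 폴더에 있는 코드 정보를 int 값에 맵핑
--     ' 리턴값 : 코드 이름에 따라 맵핑된 int 값 ( 0 ~ 104 ) / ( 공백음인 N 또는 X의 경우 404를 리턴하고 활용은 X )
--     """
--     type1 = ':maj'
--     type2 = ':min'
--     type3 = 'b:maj'
--     type4 = 'b:min'
--     type5 = '#:maj'
--     type6 = '#:min'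
--     type7 = ':maj7'
--     type8 = ':min7'
--     type9 = 'b:maj7'
--     type10 = 'b:min7'
--     type11 = '#:maj7'
--     type12 = '#:min7'
--     type13 = ':7'
--     type14 = 'b:7'
--     type15 = '#:7'
--     type_table = [type1, type2, type3, type4, type5, type6, type7, type8, type9, type10, type11, type12, type13, type14, type15]
--
--     root_chord_list = ['A', 'B', 'C', 'D', 'E', 'F', 'G']
--
--     if chord_name == 'N' or chord_name == 'X':
--         return 404
--     for chord_num, root_chord in enumerate(root_chord_list):
--         for type_num, type in enumerate(type_table):
--             if root_chord + type == chord_name: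
--                 return chord_num * 15 + type_num
-- ===== SOURCE B (Python) =====
-- def chord_to_int(chord_name):
--     if chord_name == 'N' or chord_name == 'X':
--         return 404
--     type_table = [':maj', ':min', 'b:maj', 'b:min', '#:maj', '#:min',
--                   ':maj7', ':min7', 'b:maj7', 'b:min7', '#:maj7', '#:min7',
--                   ':7', 'b:7', '#:7']
--     root_chord_list = ['A', 'B', 'C', 'D', 'E', 'F', 'G']
--     root = chord_name[:1]
--     suffix = chord_name[1:]
--     if root in root_chord_list and suffix in type_table:
--         return root_chord_list.index(root) * 15 + type_table.index(suffix)
--     return None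
-- ===== Notes on version B (the rewrite author's own statement) =====
-- stated objective: simpler
-- what changed: Replaces the nested generate-and-test loop over all 105 root+type concatenations with a direct parse of the string into a one-character root and a suffix, followed by two list membership/index lookups.
import Mathlib
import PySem

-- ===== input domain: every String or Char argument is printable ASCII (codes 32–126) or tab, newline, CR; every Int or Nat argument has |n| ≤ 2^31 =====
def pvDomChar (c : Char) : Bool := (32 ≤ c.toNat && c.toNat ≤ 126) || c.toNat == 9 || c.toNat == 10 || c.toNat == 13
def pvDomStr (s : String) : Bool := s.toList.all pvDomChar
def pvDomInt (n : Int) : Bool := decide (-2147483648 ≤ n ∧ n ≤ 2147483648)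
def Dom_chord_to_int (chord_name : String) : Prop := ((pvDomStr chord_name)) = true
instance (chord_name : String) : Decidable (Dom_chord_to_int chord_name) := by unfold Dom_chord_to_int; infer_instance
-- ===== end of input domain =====

-- B replaces A's generate-and-test over all 105 root+type concatenations by a direct
-- parse of the string into root = chord_name[:1] / suffix = chord_name[1:] and two list
-- lookups (objective: simpler).

-- the two literal tables both Pythons share (as List Char, the proof side of PySem strings)
def pvTypeTable : List (List Char) :=
  [":maj".toList, ":min".toList, "b:maj".toList, "b:min".toList, "#:maj".toList, "#:min".toList,
   ":maj7".toList, ":min7".toList, "b:maj7".toList, "b:min7".toList, "#:maj7".toList, "#:min7".toList,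
   ":7".toList, "b:7".toList, "#:7".toList]

def pvRootList : List (List Char) :=
  ["A".toList, "B".toList, "C".toList, "D".toList, "E".toList, "F".toList, "G".toList]

-- ===== PORT A =====
-- inner 'for type_num, type in enumerate(type_table)' loop with early return
def pvInnerA (s root : List Char) (chordNum : Nat) : List (List Char) → Nat → Option Int
  | [], _ => none
  | t :: ts, typeNum =>
      if root ++ t = s then some ((chordNum : Int) * 15 + (typeNum : Int))
      else pvInnerA s root chordNum ts (typeNum + 1)

-- outer 'for chord_num, root_chord in enumerate(root_chord_list)' loop
def pvOuterA (s : List Char) : List (List Char) → Nat → Option Int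
  | [], _ => none
  | r :: rs, chordNum =>
      match pvInnerA s r chordNum pvTypeTable 0 with
      | some v => some v
      | none => pvOuterA s rs (chordNum + 1)

def chord_to_int (chord_name : String) : Option Int :=
  if chord_name.toList = "N".toList ∨ chord_name.toList = "X".toList then some 404
  else pvOuterA chord_name.toList pvRootList 0

-- ===== PORT B =====
def chord_to_int_alt (chord_name : String) : Option Int :=
  if chord_name.toList = "N".toList ∨ chord_name.toList = "X".toList then some 404
  else
    let root := PySem.List.slice chord_name.toList none (some 1)    -- chord_name[:1]
    let suffix := PySem.List.slice chord_name.toList (some 1) none  -- chord_name[1:]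
    if root ∈ pvRootList ∧ suffix ∈ pvTypeTable then
      match PySem.List.index? pvRootList root, PySem.List.index? pvTypeTable suffix with
      | some i, some j => some ((i : Int) * 15 + (j : Int))
      | _, _ => none
    else none

-- ===== PRECONDITION & SPEC =====
def Spec_chord_to_int (chord_name : String) (out : Option Int) : Prop := out = chord_to_int_alt chord_name
instance (chord_name : String) (out : Option Int) : Decidable (Spec_chord_to_int chord_name out) := by unfold Spec_chord_to_int; infer_instance

-- ===== CLAIM (what is proved, stated in full; the proofs are below) =====
def Claim_equal_chord_to_int : Prop := ∀ (chord_name : String), Dom_chord_to_int chord_name → Spec_chord_to_int chord_name (chord_to_int chord_name)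

-- ===== LEMMAS AND PROOFS =====

-- A's inner loop finds nothing when the root is not a prefix of the chord name
theorem pvInnerA_not_prefix (s root : List Char) (h : ¬ root <+: s) :
    ∀ (ts : List (List Char)) (k n : Nat), pvInnerA s root n ts k = none := by
  intro ts
  induction ts with
  | nil => intro k n; rfl
  | cons t ts ih =>
      intro k n
      simp only [pvInnerA]
      rw [if_neg (fun he => h (by rw [← he]; exact List.prefix_append root t))]
      exact ih (k + 1) n

-- on s = c :: cs, A's inner loop for the root [c] is an index? lookup of the suffix cs
theorem pvInnerA_cons (c : Char) (cs : List Char) (n : Nat) :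
    ∀ (ts : List (List Char)) (k : Nat),
      pvInnerA (c :: cs) [c] n ts k =
        (PySem.List.index? ts cs).map (fun j => (n : Int) * 15 + ((k + j : Nat) : Int)) := by
  intro ts
  induction ts with
  | nil => intro k; rfl
  | cons t ts ih =>
      intro k
      by_cases ht : t = cs
      · subst ht
        rw [PySem.List.index?_cons_self]
        simp [pvInnerA]
      · rw [PySem.List.index?_cons_of_ne ts ht]
        simp only [pvInnerA, List.singleton_append, List.cons.injEq]
        rw [if_neg (by tauto)]
        rw [ih (k + 1)]
        cases hix : PySem.List.index? ts cs with
        | none => rfl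
        | some j => simp [Nat.add_assoc, Nat.add_comm j 1]

-- A's outer loop over any list of one-character roots is a double index? lookup
theorem pvOuterA_go (c : Char) (cs : List Char) :
    ∀ (rs : List (List Char)) (n : Nat), (∀ r ∈ rs, r.length = 1) →
      pvOuterA (c :: cs) rs n =
        (match PySem.List.index? rs [c], PySem.List.index? pvTypeTable cs with
         | some i, some j => some (((n + i : Nat) : Int) * 15 + (j : Int))
         | _, _ => none) := by
  intro rs
  induction rs with
  | nil => intro n _; rfl
  | cons r rs ih =>
      intro n hlen
      obtain ⟨d, rfl⟩ : ∃ d, r = [d] := by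
        cases r with
        | nil => exact absurd (hlen _ (List.mem_cons_self)) (by simp)
        | cons d r' =>
            cases r' with
            | nil => exact ⟨d, rfl⟩
            | cons _ _ => exact absurd (hlen _ (List.mem_cons_self)) (by simp)
      have hrs : ∀ r ∈ rs, r.length = 1 := fun r hr => hlen r (List.mem_cons_of_mem _ hr)
      by_cases hd : d = c
      · subst hd
        simp only [pvOuterA]
        rw [pvInnerA_cons, PySem.List.index?_cons_self]
        cases hj : PySem.List.index? pvTypeTable cs with
        | none =>
            simp only [Option.map_none]
            rw [ih (n + 1) hrs, hj]
            cases PySem.List.index? rs [d] <;> rfl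
        | some j => simp
      · simp only [pvOuterA]
        rw [pvInnerA_not_prefix _ _ (by
          intro hp
          rcases List.cons_prefix_cons.mp hp with ⟨he, _⟩
          exact hd he)]
        rw [ih (n + 1) hrs]
        rw [PySem.List.index?_cons_of_ne rs (by simpa using hd)]
        cases hi : PySem.List.index? rs [c] with
        | none => rfl
        | some i =>
            cases PySem.List.index? pvTypeTable cs with
            | none => rfl
            | some j =>
                simp only [Option.map_some]
                norm_num [Nat.add_assoc, Nat.add_comm 1 i]

theorem pv_main (l : List Char) : pvOuterA l pvRootList 0 =
    (let root := PySem.List.slice l none (some 1)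
     let suffix := PySem.List.slice l (some 1) none
     if root ∈ pvRootList ∧ suffix ∈ pvTypeTable then
       match PySem.List.index? pvRootList root, PySem.List.index? pvTypeTable suffix with
       | some i, some j => some ((i : Int) * 15 + (j : Int))
       | _, _ => none
     else none) := by
  cases l with
  | nil => decide
  | cons c cs =>
      have hroot : PySem.List.slice (c :: cs) none (some 1) = [c] := by
        rw [PySem.List.slice_to (c :: cs) (b := 1) (by norm_num)]
        rfl
      have hsuf : PySem.List.slice (c :: cs) (some 1) none = cs :=
        PySem.List.slice_from_one (c :: cs)
      rw [pvOuterA_go c cs pvRootList 0 (by decide)]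
      simp only [hroot, hsuf]
      cases h1 : PySem.List.index? pvRootList [c] with
      | none =>
          have hmem : [c] ∉ pvRootList := (PySem.List.index?_eq_none_iff _ _).mp h1
          simp [hmem]
      | some i =>
          have hmem : [c] ∈ pvRootList := by
            rw [← PySem.List.index?_isSome_iff pvRootList [c]]
            rw [h1]; rfl
          cases h2 : PySem.List.index? pvTypeTable cs with
          | none =>
              have hmem2 : cs ∉ pvTypeTable := (PySem.List.index?_eq_none_iff _ _).mp h2
              simp [hmem2]
          | some j =>
              have hmem2 : cs ∈ pvTypeTable := by
                rw [← PySem.List.index?_isSome_iff pvTypeTable cs]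
                rw [h2]; rfl
              simp [hmem, hmem2]

-- ===== VERDICT (by name: the statement is the Claim_ definition above) =====
theorem chord_to_int_spec : Claim_equal_chord_to_int := by
  intro s _
  unfold Spec_chord_to_int chord_to_int chord_to_int_alt
  split_ifs with h
  · rfl
  · exact pv_main s.toList
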